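-- pv_equiv track=rewrite | github.com/HackerUnranked/LeetCode | Easy/Python3/2215_Difference_Two_Arrays.py | findDifference_set
-- ===== SOURCE A (Python) =====
-- from typing import List
--
-- def findDifference_set(nums1: List[int], nums2: List[int]) -> List[List[int]]:
--     a = set(nums1)
--     b = set(nums2)
--     c = set()
--     d = set()
--
--     for x in nums1:
--         if x not in nums2:
--             c.add(x)
--
--     for y in nums2:
--         if y not in nums1:
--             d.add(y)
--
--     return [c, d]
-- ===== SOURCE B (Python) =====
-- from typing import List
--
-- def findDifference_set(nums1: List[int], nums2: List[int]) -> List[List[int]]: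
--     seen = {}
--     for x in nums1:
--         seen[x] = seen.get(x, 0) | 1
--     for y in nums2:
--         seen[y] = seen.get(y, 0) | 2
--     c = set()
--     d = set()
--     for k, flag in seen.items():
--         if flag == 1:
--             c.add(k)
--         elif flag == 2:
--             d.add(k)
--     return [c, d]
-- ===== Notes on version B (the rewrite author's own statement) =====
-- stated objective: faster
-- what changed: Replaces A's two loops that each do a linear membership scan of the other list with one tagging dict (bit 1 = in nums1, bit 2 = in nums2) built in a single combined walk, followed by one partition pass over the dict items.
import Mathlib
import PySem

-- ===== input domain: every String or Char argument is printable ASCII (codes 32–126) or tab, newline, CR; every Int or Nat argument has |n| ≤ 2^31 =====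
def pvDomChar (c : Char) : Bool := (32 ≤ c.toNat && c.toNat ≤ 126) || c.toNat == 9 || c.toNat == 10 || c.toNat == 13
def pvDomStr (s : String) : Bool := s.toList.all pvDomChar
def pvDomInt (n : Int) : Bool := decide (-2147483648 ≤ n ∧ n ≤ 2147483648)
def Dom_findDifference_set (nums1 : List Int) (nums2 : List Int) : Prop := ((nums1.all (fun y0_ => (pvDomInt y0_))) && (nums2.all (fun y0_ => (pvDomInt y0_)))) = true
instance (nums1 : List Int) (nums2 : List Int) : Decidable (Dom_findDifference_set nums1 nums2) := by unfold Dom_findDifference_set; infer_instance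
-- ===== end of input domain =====

-- B replaces A's two loops that each scan the other list for membership by one tagging
-- dict (bit 1 = in nums1, bit 2 = in nums2) plus a single partition pass over its items.

-- ===== PORT A =====
def findDifference_set (nums1 : List Int) (nums2 : List Int) : List (List Int) :=
  let _a : PySem.Set Int := PySem.Set.ofList nums1
  let _b : PySem.Set Int := PySem.Set.ofList nums2
  let c : PySem.Set Int := PySem.Set.empty
  let d : PySem.Set Int := PySem.Set.empty
  let c := nums1.foldl (fun c x => if !nums2.contains x then PySem.Set.add c x else c) c
  let d := nums2.foldl (fun d y => if !nums1.contains y then PySem.Set.add d y else d) d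
  [c, d]

-- ===== PORT B =====
-- one step of B's partition pass over seen.items()
def pvPartStep (cd : PySem.Set Int × PySem.Set Int) (kv : Int × Int) : PySem.Set Int × PySem.Set Int :=
  if kv.2 = 1 then (PySem.Set.add cd.1 kv.1, cd.2)
  else if kv.2 = 2 then (cd.1, PySem.Set.add cd.2 kv.1)
  else cd

def findDifference_set_alt (nums1 : List Int) (nums2 : List Int) : List (List Int) :=
  let seen : PySem.Dict Int Int := PySem.Dict.empty
  let seen := nums1.foldl (fun s x => s.insert x (PySem.Int.bor (s.getD x 0) 1)) seen
  let seen := nums2.foldl (fun s y => s.insert y (PySem.Int.bor (s.getD y 0) 2)) seen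
  let cd := seen.items.foldl pvPartStep (PySem.Set.empty, PySem.Set.empty)
  [cd.1, cd.2]

-- ===== PRECONDITION & SPEC =====
def Spec_findDifference_set (nums1 : List Int) (nums2 : List Int) (out : List (List Int)) : Prop := out = findDifference_set_alt nums1 nums2
instance (nums1 : List Int) (nums2 : List Int) (out : List (List Int)) : Decidable (Spec_findDifference_set nums1 nums2 out) := by unfold Spec_findDifference_set; infer_instance

-- ===== CLAIM (what is proved, stated in full; the proofs are below) =====
def Claim_equal_findDifference_set : Prop := ∀ (nums1 : List Int) (nums2 : List Int), Dom_findDifference_set nums1 nums2 → Spec_findDifference_set nums1 nums2 (findDifference_set nums1 nums2)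

-- ===== LEMMAS AND PROOFS =====

-- A's filtered add-loops are Set.update with the filtered list
theorem foldl_ite_add (P : Int → Bool) (l : List Int) (s : PySem.Set Int) :
    l.foldl (fun c x => if !P x then PySem.Set.add c x else c) s
      = PySem.Set.update s (l.filter (fun x => !P x)) := by
  induction l generalizing s with
  | nil => rfl
  | cons x l ih =>
    rw [List.foldl_cons]
    by_cases h : P x = true
    · rw [if_neg (by simp [h]), ih, List.filter_cons_of_neg (by simp [h])]
    · rw [if_pos (by simp [h]), ih, List.filter_cons_of_pos (by simp [h]),
        PySem.Set.update_cons]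

-- keys of a dict literal built from two key lists
theorem keys_mk_app (f g : Int → Int) (L1 L2 : List Int) :
    (PySem.Dict.mk (L1.map (fun k => (k, f k)) ++ L2.map (fun k => (k, g k)))).keys
      = L1 ++ L2 := by
  simp [PySem.Dict.keys, List.map_map, Function.comp_def]

-- getD on such a literal (keys nodup)
theorem getD_mk_app (f g : Int → Int) (L1 L2 : List Int) (h : (L1 ++ L2).Nodup) (x : Int) :
    (PySem.Dict.mk (L1.map (fun k => (k, f k)) ++ L2.map (fun k => (k, g k)))).getD x 0
      = if x ∈ L1 then f x else if x ∈ L2 then g x else 0 := by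
  have hkeys : (PySem.Dict.mk (L1.map (fun k => (k, f k)) ++ L2.map (fun k => (k, g k)))).keys.Nodup := by
    rw [keys_mk_app]; exact h
  by_cases h1 : x ∈ L1
  · have hmem : (x, f x) ∈ (PySem.Dict.mk (L1.map (fun k => (k, f k)) ++ L2.map (fun k => (k, g k)))).items := by
      show _ ∈ _ ++ _
      exact List.mem_append_left _ (List.mem_map.2 ⟨x, h1, rfl⟩)
    simpa [h1] using PySem.Dict.getD_of_mem_items _ hmem hkeys 0
  · by_cases h2 : x ∈ L2
    · have hmem : (x, g x) ∈ (PySem.Dict.mk (L1.map (fun k => (k, f k)) ++ L2.map (fun k => (k, g k)))).items := by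
        show _ ∈ _ ++ _
        exact List.mem_append_right _ (List.mem_map.2 ⟨x, h2, rfl⟩)
      simpa [h1, h2] using PySem.Dict.getD_of_mem_items _ hmem hkeys 0
    · have hc : (PySem.Dict.mk (L1.map (fun k => (k, f k)) ++ L2.map (fun k => (k, g k)))).contains x = false := by
        rw [Bool.eq_false_iff]
        intro hcc
        have := (PySem.Dict.contains_iff_mem_keys _ _).mp hcc
        rw [keys_mk_app] at this
        rcases List.mem_append.mp this with h' | h' <;> [exact h1 h'; exact h2 h']
      simp [h1, h2, PySem.Dict.getD_of_not_contains _ 0 hc]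

-- contains on such a literal
theorem contains_mk_app (f g : Int → Int) (L1 L2 : List Int) (x : Int) :
    (PySem.Dict.mk (L1.map (fun k => (k, f k)) ++ L2.map (fun k => (k, g k)))).contains x = true
      ↔ (x ∈ L1 ∨ x ∈ L2) := by
  rw [PySem.Dict.contains_iff_mem_keys, keys_mk_app]
  exact List.mem_append

-- Phase 1 of B: tagging nums1 builds the dict in dedup order, every value 1
theorem phase1 (l : List Int) (L : List Int) (hL : L.Nodup) :
    l.foldl (fun s x => s.insert x (PySem.Int.bor (s.getD x 0) 1))
        (PySem.Dict.mk (L.map (fun k => (k, (1 : Int)))))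
      = PySem.Dict.mk ((PySem.Set.update L l).map (fun k => (k, (1 : Int)))) := by
  induction l generalizing L with
  | nil => simp [PySem.Set.update]
  | cons x l ih =>
    have happ : L.map (fun k => (k, (1:Int))) = L.map (fun k => (k, (1:Int))) ++ ([] : List Int).map (fun k => (k, (1:Int))) := by simp
    have hget : (PySem.Dict.mk (L.map (fun k => (k, (1:Int))))).getD x 0 = if x ∈ L then 1 else 0 := by
      rw [happ]
      simpa using getD_mk_app (fun _ => 1) (fun _ => 1) L [] (by simpa using hL) x
    have hcon : (PySem.Dict.mk (L.map (fun k => (k, (1:Int))))).contains x = true ↔ (x ∈ L ∨ x ∈ ([] : List Int)) := by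
      rw [happ]; exact contains_mk_app _ _ L [] x
    by_cases hx : x ∈ L
    · have hc : (PySem.Dict.mk (L.map (fun k => (k, (1 : Int))))).contains x = true :=
        hcon.mpr (Or.inl hx)
      have hins : (PySem.Dict.mk (L.map (fun k => (k, (1 : Int))))).insert x
            (PySem.Int.bor ((PySem.Dict.mk (L.map (fun k => (k, (1 : Int))))).getD x 0) 1)
          = PySem.Dict.mk (L.map (fun k => (k, (1 : Int)))) := by
        apply PySem.Dict.ext
        rw [PySem.Dict.items_insert_of_contains _ _ hc]
        show (L.map (fun k => (k, (1:Int)))).map _ = _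
        rw [List.map_map]
        apply List.map_congr_left
        intro a _
        by_cases hax : a = x
        · simp [hax, hget, hx]
          decide
        · simp [hax]
      rw [List.foldl_cons, hins, ih L hL, PySem.Set.update_cons,
        PySem.Set.add_of_mem hx]
    · have hc : (PySem.Dict.mk (L.map (fun k => (k, (1 : Int))))).contains x = false := by
        rw [Bool.eq_false_iff]
        intro hcc
        rcases hcon.mp hcc with h' | h'
        · exact hx h'
        · simp at h' 
      have hins : (PySem.Dict.mk (L.map (fun k => (k, (1 : Int))))).insert x
            (PySem.Int.bor ((PySem.Dict.mk (L.map (fun k => (k, (1 : Int))))).getD x 0) 1)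
          = PySem.Dict.mk ((L ++ [x]).map (fun k => (k, (1 : Int)))) := by
        apply PySem.Dict.ext
        rw [PySem.Dict.items_insert_of_not_contains _ _ hc]
        simp [hget, hx]
        decide
      have hnd : (L ++ [x]).Nodup := by
        refine List.nodup_append.mpr ⟨hL, List.nodup_singleton x, ?_⟩
        intro a ha b hb
        have hb' := List.mem_singleton.mp hb
        subst hb'
        exact fun e => hx (e ▸ ha)
      rw [List.foldl_cons, hins, ih _ hnd, PySem.Set.update_cons,
        PySem.Set.add_of_not_mem hx]

-- Phase 2 of B: tagging nums2 upgrades hit nums1-keys to 3 and appends fresh keys with 2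
theorem phase2 (l : List Int) (Q : Int → Bool) (L1 L2 : List Int)
    (h : (L1 ++ L2).Nodup) :
    l.foldl (fun s y => s.insert y (PySem.Int.bor (s.getD y 0) 2))
        (PySem.Dict.mk (L1.map (fun k => (k, if Q k then (3:Int) else 1))
          ++ L2.map (fun k => (k, (2:Int)))))
      = PySem.Dict.mk (L1.map (fun k => (k, if (Q k || l.contains k) then (3:Int) else 1))
          ++ (PySem.Set.update L2 (l.filter (fun y => !L1.contains y))).map (fun k => (k, (2:Int)))) := by
  induction l generalizing Q L2 with
  | nil => simp [PySem.Set.update]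
  | cons y l ih =>
    have hdisj : ∀ a ∈ L1, a ∉ L2 := by
      intro a ha hb
      exact (List.nodup_append.mp h).2.2 a ha a hb rfl
    have hgd := getD_mk_app (fun k => if Q k then (3:Int) else 1) (fun _ => (2:Int)) L1 L2 h y
    have hcn := contains_mk_app (fun k => if Q k then (3:Int) else 1) (fun _ => (2:Int)) L1 L2 y
    rw [List.foldl_cons]
    by_cases h1 : y ∈ L1
    · -- y is a nums1 key: its flag becomes 3, dict shape unchanged
      have hc := hcn.mpr (Or.inl h1)
      have hins : (PySem.Dict.mk (L1.map (fun k => (k, if Q k then (3:Int) else 1))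
              ++ L2.map (fun k => (k, (2:Int))))).insert y
            (PySem.Int.bor ((PySem.Dict.mk (L1.map (fun k => (k, if Q k then (3:Int) else 1))
              ++ L2.map (fun k => (k, (2:Int))))).getD y 0) 2)
          = PySem.Dict.mk (L1.map (fun k => (k, if (Q k || (k == y)) then (3:Int) else 1))
              ++ L2.map (fun k => (k, (2:Int)))) := by
        apply PySem.Dict.ext
        rw [PySem.Dict.items_insert_of_contains _ _ hc]
        show (L1.map (fun k => (k, if Q k then (3:Int) else 1))
            ++ L2.map (fun k => (k, (2:Int)))).map _ = _
        rw [List.map_append]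
        congr 1
        · rw [List.map_map]
          apply List.map_congr_left
          intro a ha
          by_cases hay : a = y
          · subst hay
            simp only [Function.comp_apply, BEq.rfl, if_true,
              Bool.or_true, hgd, if_pos h1]
            by_cases hq : Q a <;> simp [hq] <;> decide
          · simp [Function.comp_apply, hay]
        · rw [List.map_map]
          apply List.map_congr_left
          intro a ha
          have hay : a ≠ y := fun e => hdisj y h1 (e ▸ ha)
          simp [Function.comp_apply, hay]
      rw [hins, ih (fun k => Q k || (k == y)) L2 h]
      congr 1
      congr 1
      · apply List.map_congr_left
        intro a ha
        simp only [List.contains_cons, Bool.or_assoc]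
      · rw [List.filter_cons_of_neg (by simp [h1])]
    · by_cases h2 : y ∈ L2
      · -- y already tagged 2: dict unchanged
        have hc := hcn.mpr (Or.inr h2)
        have hv : PySem.Int.bor ((PySem.Dict.mk (L1.map (fun k => (k, if Q k then (3:Int) else 1))
              ++ L2.map (fun k => (k, (2:Int))))).getD y 0) 2 = 2 := by
          rw [hgd]; simp only [h1, if_false, h2, if_true]; decide
        have hins : (PySem.Dict.mk (L1.map (fun k => (k, if Q k then (3:Int) else 1))
                ++ L2.map (fun k => (k, (2:Int))))).insert y
              (PySem.Int.bor ((PySem.Dict.mk (L1.map (fun k => (k, if Q k then (3:Int) else 1))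
                ++ L2.map (fun k => (k, (2:Int))))).getD y 0) 2)
            = PySem.Dict.mk (L1.map (fun k => (k, if Q k then (3:Int) else 1))
                ++ L2.map (fun k => (k, (2:Int)))) := by
          apply PySem.Dict.ext
          rw [PySem.Dict.items_insert_of_contains _ _ hc, hv]
          show List.map _ (L1.map (fun k => (k, if Q k then (3:Int) else 1))
              ++ L2.map (fun k => (k, (2:Int)))) = _
          conv_rhs => rw [← List.map_id (L1.map (fun k => (k, if Q k then (3:Int) else 1))
              ++ L2.map (fun k => (k, (2:Int))))]
          apply List.map_congr_left
          intro p hp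
          rcases List.mem_append.mp hp with hp1 | hp2
          · obtain ⟨a, ha, rfl⟩ := List.mem_map.mp hp1
            have hay : a ≠ y := fun e => h1 (e ▸ ha)
            simp [hay]
          · obtain ⟨a, ha, rfl⟩ := List.mem_map.mp hp2
            by_cases hay : a = y
            · subst hay; simp
            · simp [hay]
        rw [hins, ih Q L2 h]
        congr 1
        congr 1
        · apply List.map_congr_left
          intro a ha
          have hay : a ≠ y := fun e => h1 (e ▸ ha)
          simp [hay]
        · rw [List.filter_cons_of_pos (by simp [h1]), PySem.Set.update_cons,
            PySem.Set.add_of_mem h2]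
      · -- fresh key: appended with flag 2
        have hc : (PySem.Dict.mk (L1.map (fun k => (k, if Q k then (3:Int) else 1))
              ++ L2.map (fun k => (k, (2:Int))))).contains y = false := by
          rw [Bool.eq_false_iff]
          intro hcc
          rcases hcn.mp hcc with h' | h'
          · exact h1 h'
          · exact h2 h'
        have hv : PySem.Int.bor ((PySem.Dict.mk (L1.map (fun k => (k, if Q k then (3:Int) else 1))
              ++ L2.map (fun k => (k, (2:Int))))).getD y 0) 2 = 2 := by
          rw [hgd]; simp only [if_neg h1, if_neg h2]; decide
        have hins : (PySem.Dict.mk (L1.map (fun k => (k, if Q k then (3:Int) else 1))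
                ++ L2.map (fun k => (k, (2:Int))))).insert y
              (PySem.Int.bor ((PySem.Dict.mk (L1.map (fun k => (k, if Q k then (3:Int) else 1))
                ++ L2.map (fun k => (k, (2:Int))))).getD y 0) 2)
            = PySem.Dict.mk (L1.map (fun k => (k, if Q k then (3:Int) else 1))
                ++ (L2 ++ [y]).map (fun k => (k, (2:Int)))) := by
          apply PySem.Dict.ext
          rw [PySem.Dict.items_insert_of_not_contains _ _ hc, hv]
          show _ ++ [(y, (2:Int))] = _
          rw [List.map_append, List.append_assoc]
          rfl
        have hnd : (L1 ++ (L2 ++ [y])).Nodup := by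
          rw [← List.append_assoc]
          refine List.nodup_append.mpr ⟨h, List.nodup_singleton y, ?_⟩
          intro a ha b hb
          have hb' := List.mem_singleton.mp hb
          subst hb'
          intro e
          rcases List.mem_append.mp ha with h' | h'
          · exact h1 (e ▸ h')
          · exact h2 (e ▸ h')
        rw [hins, ih Q (L2 ++ [y]) hnd]
        congr 1
        congr 1
        · apply List.map_congr_left
          intro a ha
          have hay : a ≠ y := fun e => h1 (e ▸ ha)
          simp [hay]
        · rw [List.filter_cons_of_pos (by simp [h1]), PySem.Set.update_cons,
            PySem.Set.add_of_not_mem h2]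

-- the partition pass over the two halves of the final items list
theorem part_L1 (b : Int → Bool) (L : List Int) (cd : PySem.Set Int × PySem.Set Int) :
    (L.map (fun k => (k, if b k then (3:Int) else 1))).foldl pvPartStep cd
      = (PySem.Set.update cd.1 (L.filter (fun k => !b k)), cd.2) := by
  induction L generalizing cd with
  | nil => simp [PySem.Set.update]
  | cons x L ih =>
    by_cases hx : b x = true <;>
      simp [pvPartStep, hx, ih, PySem.Set.update_cons]

theorem part_L2 (L : List Int) (cd : PySem.Set Int × PySem.Set Int) :
    (L.map (fun k => (k, (2:Int)))).foldl pvPartStep cd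
      = (cd.1, PySem.Set.update cd.2 L) := by
  induction L generalizing cd with
  | nil => simp [PySem.Set.update]
  | cons x L ih => simp [pvPartStep, ih, PySem.Set.update_cons]

-- ofList commutes with filter
theorem ofList_filter (p : Int → Bool) (l : List Int) :
    PySem.Set.ofList (l.filter p) = (PySem.Set.ofList l).filter p := by
  induction l with
  | nil => rfl
  | cons x l ih =>
    by_cases hx : p x = true
    · rw [List.filter_cons_of_pos hx, PySem.Set.ofList_cons, ih, PySem.Set.ofList_cons,
        List.filter_cons_of_pos hx]
      simp only [PySem.Set.discard, List.filter_comm]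
    · rw [List.filter_cons_of_neg (by simp [hx]), ih, PySem.Set.ofList_cons,
        List.filter_cons_of_neg (by simp [hx])]
      rw [show PySem.Set.discard (PySem.Set.ofList l) x
            = (PySem.Set.ofList l).filter (fun y => !(y == x)) from by simp [PySem.Set.discard]]
      rw [List.filter_comm]
      symm
      apply List.filter_eq_self.mpr
      intro a ha
      have hpa : p a = true := (List.mem_filter.mp ha).2
      have hax : a ≠ x := fun e => hx (e ▸ hpa)
      simp [hax]

-- set(l) membership test agrees with the list's
theorem contains_ofList (l : List Int) (y : Int) :
    List.contains (PySem.Set.ofList l) y = List.contains l y := by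
  by_cases h : y ∈ l <;> simp [PySem.Set.mem_ofList, h]

-- ===== VERDICT (by name: the statement is the Claim_ definition above) =====
theorem findDifference_set_spec : Claim_equal_findDifference_set := by
  unfold Claim_equal_findDifference_set
  intro nums1 nums2 _
  unfold Spec_findDifference_set findDifference_set findDifference_set_alt
  simp only []
  -- A's two loops
  have hA1 := foldl_ite_add (fun x => nums2.contains x) nums1 PySem.Set.empty
  have hA2 := foldl_ite_add (fun y => nums1.contains y) nums2 PySem.Set.empty
  rw [hA1, hA2]
  -- B's dict build
  have he : (PySem.Dict.empty : PySem.Dict Int Int)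
      = PySem.Dict.mk (([] : List Int).map (fun k => (k, (1:Int)))) := rfl
  rw [he, phase1 nums1 [] List.nodup_nil]
  have hshape : PySem.Dict.mk ((PySem.Set.update ([] : List Int) nums1).map (fun k => (k, (1:Int))))
      = PySem.Dict.mk ((PySem.Set.ofList nums1).map (fun k => (k, if (fun _ => false) k then (3:Int) else 1))
          ++ ([] : List Int).map (fun k => (k, (2:Int)))) := by
    rw [PySem.Set.update_nil_left]
    congr 1
    rw [List.map_nil, List.append_nil]
    apply List.map_congr_left
    intro a _
    simp
  rw [hshape, phase2 nums2 (fun _ => false) (PySem.Set.ofList nums1) []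
    (by simp [PySem.Set.nodup_ofList])]
  -- B's partition pass
  show _ = [((PySem.Dict.mk _).items.foldl pvPartStep (PySem.Set.empty, PySem.Set.empty)).1,
            ((PySem.Dict.mk _).items.foldl pvPartStep (PySem.Set.empty, PySem.Set.empty)).2]
  rw [show ∀ ps : List (Int × Int), (PySem.Dict.mk ps).items = ps from fun _ => rfl]
  rw [List.foldl_append, part_L1, part_L2]
  -- normalise both sides to ofList of filtered input lists
  simp only [PySem.Set.empty, Bool.false_or, PySem.Set.update_nil_left, contains_ofList]
  rw [← ofList_filter, PySem.Set.ofList_ofList, PySem.Set.ofList_ofList]
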